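-- pv_equiv track=rewrite | github.com/tothedarktowercame/futon3c | scripts/fm001/generate_witness.py | eligible_n_values
-- ===== SOURCE A (Python) =====
-- import math
--
-- def is_prime(n):
--     """Miller-Rabin primality test for n < 3.3e24 (deterministic for small n)."""
--     if n < 2:
--         return False
--     if n < 4:
--         return True
--     if n % 2 == 0:
--         return False
--     # Deterministic witnesses for n < 3.3e24
--     d, r = n - 1, 0
--     while d % 2 == 0:
--         d //= 2
--         r += 1
--     for a in [2, 3, 5, 7, 11, 13, 17, 19, 23, 29, 31, 37]:
--         if a >= n:
--             continue
--         x = pow(a, d, n)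
--         if x == 1 or x == n - 1:
--             continue
--         for _ in range(r - 1):
--             x = pow(x, 2, n)
--             if x == n - 1:
--                 break
--         else:
--             return False
--     return True
--
-- def prime_power_decompose(q):
--     """If q is a prime power p^k, return (p, k). Otherwise return None."""
--     if q < 2:
--         return None
--     if is_prime(q):
--         return (q, 1)
--     # Check small primes
--     for p in range(2, int(math.isqrt(q)) + 1):
--         if not is_prime(p):
--             continue
--         if q % p != 0:
--             continue
--         k = 0
--         val = q
--         while val % p == 0:
--             val //= p
--             k += 1
--         if val == 1:
--             return (p, k)
--     return None
--
-- def eligible_n_values(max_n=100):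
--     """Return all n <= max_n where q=2n-1 is prime power with q ≡ 1 (mod 4)."""
--     results = []
--     for n in range(2, max_n + 1):
--         q = 2 * n - 1
--         if q % 4 != 1:
--             continue
--         if prime_power_decompose(q) is not None:
--             results.append(n)
--     return results
-- ===== SOURCE B (Python) =====
-- import math
--
-- def is_prime(n):
--     """Miller-Rabin primality test (module helper, unchanged)."""
--     if n < 2:
--         return False
--     if n < 4:
--         return True
--     if n % 2 == 0:
--         return False
--     d, r = n - 1, 0
--     while d % 2 == 0:
--         d //= 2
--         r += 1
--     for a in [2, 3, 5, 7, 11, 13, 17, 19, 23, 29, 31, 37]: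
--         if a >= n:
--             continue
--         x = pow(a, d, n)
--         if x == 1 or x == n - 1:
--             continue
--         for _ in range(r - 1):
--             x = pow(x, 2, n)
--             if x == n - 1:
--                 break
--         else:
--             return False
--     return True
--
-- def _iroot(q, k):
--     """Floor k-th root of q (q >= 1, k >= 1), by binary search."""
--     lo, hi = 1, q
--     while lo < hi:
--         mid = (lo + hi + 1) // 2
--         if mid ** k <= q:
--             lo = mid
--         else:
--             hi = mid - 1
--     return lo
--
-- def eligible_n_values(max_n=100):
--     """Return all n <= max_n where q=2n-1 is prime power with q ≡ 1 (mod 4)."""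
--     results = []
--     for n in range(2, max_n + 1):
--         q = 2 * n - 1
--         if q % 4 != 1:
--             continue
--         if is_prime(q):
--             results.append(n)
--             continue
--         # q composite: q is a proper prime power iff q == r**k for some
--         # exponent k >= 2 with r prime; try each of the O(log q) exponents.
--         k = 2
--         while 2 ** k <= q:
--             r = _iroot(q, k)
--             if r ** k == q and is_prime(r):
--                 results.append(n)
--                 break
--             k += 1
--     return results
-- ===== Notes on version B (the rewrite author's own statement) =====
-- stated objective: faster
-- what changed: A's prime_power_decompose scans every candidate up to isqrt(q), running a Miller-Rabin test on each before trial-dividing; B instead tries only the logarithmically many exponents k (from two upward), extracting the integer k-th root of q by binary search and accepting when the root is exact and prime, so the square-root-length candidate scan disappears.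
import Mathlib
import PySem

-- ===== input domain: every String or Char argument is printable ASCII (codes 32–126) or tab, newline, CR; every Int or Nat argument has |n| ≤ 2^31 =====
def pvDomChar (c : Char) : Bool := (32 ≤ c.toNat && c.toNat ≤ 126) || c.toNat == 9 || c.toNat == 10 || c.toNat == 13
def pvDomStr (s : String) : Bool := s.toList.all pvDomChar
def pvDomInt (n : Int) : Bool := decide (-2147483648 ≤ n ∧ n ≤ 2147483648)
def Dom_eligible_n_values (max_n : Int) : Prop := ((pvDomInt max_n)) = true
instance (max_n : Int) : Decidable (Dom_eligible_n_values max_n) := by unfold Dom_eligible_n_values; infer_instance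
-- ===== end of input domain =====

-- B replaces A's trial scan over all candidates up to isqrt(q) (a Miller-Rabin test per
-- candidate) by trying the O(log q) integer k-th roots of q; measured faster.

-- ===== SHARED HELPER (the module's is_prime, used verbatim by both A and B) =====

-- 'while d % 2 == 0: d //= 2; r += 1' (fuel ≥ the starting value bounds the halvings)
def drLoop : Nat → Int → Int → (Int × Int)
  | 0, d, r => (d, r)
  | f+1, d, r => if PySem.Int.mod d 2 = 0 then drLoop f (PySem.Int.floordiv d 2) (r + 1) else (d, r)

-- 'for _ in range(r-1): x = pow(x, 2, n); if x == n-1: break / else: return False'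
def sqLoop (n : Int) : Nat → Int → Bool
  | 0, _ => false
  | k+1, x =>
    let x' := PySem.Int.powMod x 2 n  -- pow(x, 2, n)
    if x' = n - 1 then true else sqLoop n k x'

-- body of the 'for a in [...]' loop: 'continue' = true, 'return False' = false
def mrWitness (n d r a : Int) : Bool :=
  if a ≥ n then true
  else
    let x := PySem.Int.powMod a d.toNat n  -- pow(a, d, n); exact for d ≥ 0, the only use
    if x = 1 ∨ x = n - 1 then true
    else sqLoop n (r - 1).toNat x

def is_prime (n : Int) : Bool :=
  if n < 2 then false
  else if n < 4 then true
  else if PySem.Int.mod n 2 = 0 then false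
  else
    let dr := drLoop (n - 1).toNat (n - 1) 0
    [2, 3, 5, 7, 11, 13, 17, 19, 23, 29, 31, 37].all (fun a => mrWitness n dr.1 dr.2 a)

-- ===== PORT A =====

-- 'k = 0; val = q; while val % p == 0: val //= p; k += 1' (fuel ≥ val bounds the steps)
def divOutA : Nat → Int → Int → Int → (Int × Int)
  | 0, val, _, k => (val, k)
  | f+1, val, p, k =>
    if PySem.Int.mod val p = 0 then divOutA f (PySem.Int.floordiv val p) p (k + 1) else (val, k)

-- the 'for p in range(2, isqrt(q)+1)' loop of prime_power_decompose
def ppdLoop (q : Int) : List Int → Option (Int × Int)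
  | [] => none
  | p :: ps =>
    if is_prime p = false then ppdLoop q ps
    else if PySem.Int.mod q p ≠ 0 then ppdLoop q ps
    else
      let vk := divOutA q.toNat q p 0
      if vk.1 = 1 then some (p, vk.2) else ppdLoop q ps

-- int(math.isqrt(q)) is ported as Nat.sqrt q.toNat (exact for q ≥ 0, the only use)
def prime_power_decompose (q : Int) : Option (Int × Int) :=
  if q < 2 then none
  else if is_prime q = true then some (q, 1)
  else ppdLoop q (PySem.List.pyRange 2 (((Nat.sqrt q.toNat : Nat) : Int) + 1) 1)

def eligible_n_values (max_n : Int) : List Int :=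
  (PySem.List.pyRange 2 (max_n + 1) 1).foldl
    (fun results n =>
      let q := 2 * n - 1
      if PySem.Int.mod q 4 ≠ 1 then results
      else if (prime_power_decompose q).isSome = true then results ++ [n]
      else results)
    []

-- ===== PORT B =====

-- _iroot's 'while lo < hi' binary search (fuel ≥ hi - lo bounds the steps);
-- 'mid ** k' is ported as mid ^ k.toNat (exact for k ≥ 0, the only use)
def irootLoop (q k : Int) : Nat → Int → Int → Int
  | 0, lo, _ => lo
  | f+1, lo, hi =>
    if lo < hi then
      let mid := PySem.Int.floordiv (lo + hi + 1) 2
      if mid ^ k.toNat ≤ q then irootLoop q k f mid hi else irootLoop q k f lo (mid - 1)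
    else lo

def iroot (q k : Int) : Int := irootLoop q k (q - 1).toNat 1 q

-- 'k = 2; while 2 ** k <= q: r = _iroot(q, k); if r ** k == q and is_prime(r): append; break
--  ... k += 1' — returned as the decision whether n is appended (fuel ≥ the iterations)
def powLoop (q : Int) : Nat → Int → Bool
  | 0, _ => false
  | f+1, k =>
    if (2 : Int) ^ k.toNat ≤ q then
      if (iroot q k) ^ k.toNat = q ∧ is_prime (iroot q k) = true then true
      else powLoop q f (k + 1)
    else false

def eligible_n_values_alt (max_n : Int) : List Int :=
  (PySem.List.pyRange 2 (max_n + 1) 1).foldl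
    (fun results n =>
      let q := 2 * n - 1
      if PySem.Int.mod q 4 ≠ 1 then results
      else if is_prime q = true then results ++ [n]
      else if powLoop q 64 2 = true then results ++ [n]
      else results)
    []

-- ===== PRECONDITION & SPEC =====
def Spec_eligible_n_values (max_n : Int) (out : List Int) : Prop := out = eligible_n_values_alt max_n
instance (max_n : Int) (out : List Int) : Decidable (Spec_eligible_n_values max_n out) := by unfold Spec_eligible_n_values; infer_instance

-- ===== CLAIM (what is proved, stated in full; the proofs are below) =====
def Claim_equal_eligible_n_values : Prop := ∀ (max_n : Int), Dom_eligible_n_values max_n → Spec_eligible_n_values max_n (eligible_n_values max_n)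

-- ===== LEMMAS AND PROOFS =====

-- the division loop reaches 1 exactly on pure powers of d
theorem divOutB_aux (d : Int) (hd : 2 ≤ d) : ∀ (fuel : Nat) (val k : Int), 0 < val →
    val.toNat ≤ fuel → ((divOutA fuel val d k).1 = 1 ↔ ∃ j : Nat, val = d ^ j) := by
  intro fuel
  induction fuel with
  | zero => intro val k hv hf; omega
  | succ f ih =>
    intro val k hv hf
    simp only [divOutA]
    by_cases hdvd : PySem.Int.mod val d = 0
    · rw [if_pos hdvd]
      obtain ⟨c, hc⟩ := (PySem.Int.mod_eq_zero_iff_dvd val d).mp hdvd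
      have hcpos : 0 < c := by nlinarith
      have hclt : c < val := by nlinarith
      have hfd : PySem.Int.floordiv val d = c := by
        rw [PySem.Int.floordiv_eq_ediv_of_pos (by omega), hc]
        exact Int.mul_ediv_cancel_left c (by omega)
      rw [hfd, ih c (k + 1) hcpos (by omega)]
      constructor
      · rintro ⟨j, hj⟩
        exact ⟨j + 1, by rw [hc, hj, pow_succ]; ring⟩
      · rintro ⟨j, hj⟩
        cases j with
        | zero =>
          exfalso
          rw [pow_zero] at hj
          have : d ∣ (1 : Int) := hj ▸ ⟨c, hc⟩
          have := Int.le_of_dvd one_pos this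
          omega
        | succ i =>
          refine ⟨i, mul_left_cancel₀ (show d ≠ 0 by omega) ?_⟩
          rw [← hc, hj, pow_succ]; ring
    · rw [if_neg hdvd]
      constructor
      · intro h1
        exact ⟨0, by simpa using h1⟩
      · rintro ⟨j, hj⟩
        cases j with
        | zero => simpa using hj
        | succ i =>
          exfalso
          apply hdvd
          rw [PySem.Int.mod_eq_zero_iff_dvd]
          exact ⟨d ^ i, by rw [hj, pow_succ]; ring⟩

-- A's candidate scan succeeds iff some candidate passes all three tests
theorem ppdLoop_isSome_iff (q : Int) (l : List Int) :
    (ppdLoop q l).isSome = true ↔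
      ∃ p ∈ l, is_prime p = true ∧ PySem.Int.mod q p = 0 ∧ (divOutA q.toNat q p 0).1 = 1 := by
  induction l with
  | nil => simp [ppdLoop]
  | cons p ps ih =>
    simp only [ppdLoop]
    split_ifs with h1 h2 h3
    · rw [ih]
      simp only [List.mem_cons]
      constructor
      · rintro ⟨x, hx, hxx⟩
        exact ⟨x, Or.inr hx, hxx⟩
      · rintro ⟨x, hx | hx, hxx⟩
        · subst hx; rw [h1] at hxx; exact absurd hxx.1 (by simp)
        · exact ⟨x, hx, hxx⟩
    · rw [ih]
      simp only [List.mem_cons]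
      constructor
      · rintro ⟨x, hx, hxx⟩
        exact ⟨x, Or.inr hx, hxx⟩
      · rintro ⟨x, hx | hx, hxx⟩
        · exact absurd (hx ▸ hxx.2.1) h2
        · exact ⟨x, hx, hxx⟩
    · simp only [Option.isSome_some, true_iff]
      exact ⟨p, List.mem_cons_self .., by simpa using h1, by simpa using h2, h3⟩
    · rw [ih]
      simp only [List.mem_cons]
      constructor
      · rintro ⟨x, hx, hxx⟩
        exact ⟨x, Or.inr hx, hxx⟩
      · rintro ⟨x, hx | hx, hxx⟩
        · exact absurd (hx ▸ hxx.2.2) h3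
        · exact ⟨x, hx, hxx⟩

-- binary-search invariant for the k-th-root loop
theorem irootLoop_spec (q k : Int) (hk : 1 ≤ k) : ∀ (fuel : Nat) (lo hi : Int), 1 ≤ lo →
    lo ≤ hi → lo ^ k.toNat ≤ q → (∀ x : Int, hi < x → q < x ^ k.toNat) →
    (hi - lo).toNat ≤ fuel →
    1 ≤ irootLoop q k fuel lo hi ∧ (irootLoop q k fuel lo hi) ^ k.toNat ≤ q ∧
      (∀ x : Int, irootLoop q k fuel lo hi < x → q < x ^ k.toNat) := by
  intro fuel
  induction fuel with
  | zero =>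
    intro lo hi h1 h2 h3 h4 h5
    have : hi = lo := by omega
    subst this
    exact ⟨h1, h3, h4⟩
  | succ f ih =>
    intro lo hi h1 h2 h3 h4 h5
    simp only [irootLoop]
    by_cases hlh : lo < hi
    · rw [if_pos hlh]
      have hed : PySem.Int.floordiv (lo + hi + 1) 2 = (lo + hi + 1) / 2 :=
        PySem.Int.floordiv_eq_ediv_of_pos (by omega)
      by_cases hm : (PySem.Int.floordiv (lo + hi + 1) 2) ^ k.toNat ≤ q
      · rw [if_pos hm]
        exact ih _ hi (by omega) (by omega) hm h4 (by omega)
      · rw [if_neg hm]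
        refine ih lo _ h1 (by omega) h3 ?_ (by omega)
        intro x hx
        have hmx : PySem.Int.floordiv (lo + hi + 1) 2 ≤ x := by omega
        have := pow_le_pow_left₀ (show (0:Int) ≤ PySem.Int.floordiv (lo + hi + 1) 2 by omega) hmx k.toNat
        omega
    · rw [if_neg hlh]
      have : hi = lo := by omega
      subst this
      exact ⟨h1, h3, h4⟩

theorem iroot_spec (q k : Int) (hq : 1 ≤ q) (hk : 1 ≤ k) :
    1 ≤ iroot q k ∧ (iroot q k) ^ k.toNat ≤ q ∧
      (∀ x : Int, iroot q k < x → q < x ^ k.toNat) := by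
  refine irootLoop_spec q k hk (q - 1).toNat 1 q le_rfl hq (by simpa using hq) ?_ (by omega)
  intro x hx
  have h1x : 1 ≤ x := by omega
  have := le_self_pow₀ h1x (show k.toNat ≠ 0 by omega)
  omega

-- the root loop recovers the base of an exact power
theorem iroot_exact (q k r : Int) (hq : 1 ≤ q) (hk : 1 ≤ k) (hr : 1 ≤ r)
    (hrk : r ^ k.toNat = q) : iroot q k = r := by
  obtain ⟨h1, h2, h3⟩ := iroot_spec q k hq hk
  rcases lt_trichotomy (iroot q k) r with h | h | h
  · have := h3 r h
    omega
  · exact h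
  · exfalso
    have := pow_lt_pow_left₀ h (by omega : (0:Int) ≤ r) (show k.toNat ≠ 0 by omega)
    omega

-- B's exponent scan succeeds iff some exponent ≥ k gives an exact root passing is_prime
theorem powLoop_iff (q : Int) : ∀ (fuel : Nat) (k : Int), 2 ≤ k →
    q < 2 ^ (k.toNat + fuel) →
    (powLoop q fuel k = true ↔ ∃ m : Int, k ≤ m ∧ (2 : Int) ^ m.toNat ≤ q ∧
      (iroot q m) ^ m.toNat = q ∧ is_prime (iroot q m) = true) := by
  intro fuel
  induction fuel with
  | zero =>
    intro k hk hfuel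
    simp only [powLoop, Bool.false_eq_true, false_iff]
    rintro ⟨m, hm, h2m, -, -⟩
    have hmono : (2:Int) ^ (k.toNat + 0) ≤ 2 ^ m.toNat :=
      pow_le_pow_right₀ (by norm_num) (by omega)
    omega
  | succ f ih =>
    intro k hk hfuel
    simp only [powLoop]
    by_cases hg : (2 : Int) ^ k.toNat ≤ q
    · rw [if_pos hg]
      by_cases hex : (iroot q k) ^ k.toNat = q ∧ is_prime (iroot q k) = true
      · rw [if_pos hex]
        constructor
        · intro _
          exact ⟨k, le_rfl, hg, hex.1, hex.2⟩
        · intro _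
          rfl
      · rw [if_neg hex]
        rw [ih (k + 1) (by omega) (by
          have : (k + 1).toNat + f = k.toNat + (f + 1) := by omega
          rw [this]; exact hfuel)]
        constructor
        · rintro ⟨m, hm, rest⟩
          exact ⟨m, by omega, rest⟩
        · rintro ⟨m, hm, h2m, hroot, hpr⟩
          rcases eq_or_lt_of_le hm with rfl | hlt
          · exact absurd ⟨hroot, hpr⟩ hex
          · exact ⟨m, by omega, h2m, hroot, hpr⟩
    · rw [if_neg hg]
      simp only [Bool.false_eq_true, false_iff]
      rintro ⟨m, hm, h2m, -, -⟩
      have : (2:Int) ^ k.toNat ≤ 2 ^ m.toNat := pow_le_pow_right₀ (by norm_num) (by omega)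
      omega

-- comparison with isqrt is comparison of squares
theorem le_sqrt_int (q p : Int) (hq : 0 ≤ q) (hp : 0 ≤ p) :
    p ≤ ((Nat.sqrt q.toNat : Nat) : Int) ↔ p * p ≤ q := by
  rw [show p = ((p.toNat : Nat) : Int) from (Int.toNat_of_nonneg hp).symm]
  rw [Int.ofNat_le]
  rw [Nat.le_sqrt]
  constructor
  · intro h
    have : ((p.toNat * p.toNat : Nat) : Int) ≤ ((q.toNat : Nat) : Int) := by exact_mod_cast h
    push_cast at this
    omega
  · intro h
    have hpin : ((p.toNat * p.toNat : Nat) : Int) ≤ ((q.toNat : Nat) : Int) := by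
      push_cast
      omega
    exact_mod_cast hpin

-- the heart: A's scan of all candidates up to isqrt(q) agrees with B's scan of exponents
theorem branch_iff (q : Int) (h3 : 3 ≤ q) (hub : q ≤ 4294967295) :
    ((ppdLoop q (PySem.List.pyRange 2 (((Nat.sqrt q.toNat : Nat) : Int) + 1) 1)).isSome = true
      ↔ powLoop q 64 2 = true) := by
  rw [ppdLoop_isSome_iff, powLoop_iff q 64 2 (by norm_num) (by
    have h66 : ((2:Int) ^ ((2:Int).toNat + 64)) = 73786976294838206464 := by decide
    omega)]
  constructor
  · rintro ⟨p, hpL, hpf, hpmod, hpdiv⟩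
    obtain ⟨hp2, hps⟩ := PySem.List.mem_pyRange_one.mp hpL
    have hpp : p * p ≤ q := (le_sqrt_int q p (by omega) (by omega)).mp (by omega)
    obtain ⟨j, hj⟩ := (divOutB_aux p (by omega) q.toNat q 0 (by omega) le_rfl).mp hpdiv
    have hj2 : 2 ≤ j := by
      by_contra hcon
      have : j = 0 ∨ j = 1 := by omega
      rcases this with rfl | rfl
      · rw [pow_zero] at hj; omega
      · rw [pow_one] at hj; nlinarith
    have hjt : ((j : Int)).toNat = j := Int.toNat_natCast j
    have hroot : iroot q (j : Int) = p :=
      iroot_exact q (j : Int) p (by omega) (by omega) (by omega) (by rw [hjt, ← hj])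
    refine ⟨(j : Int), by exact_mod_cast hj2, ?_, ?_, ?_⟩
    · rw [hjt]
      calc (2:Int) ^ j ≤ p ^ j := pow_le_pow_left₀ (by norm_num) (by omega) j
        _ = q := hj.symm
    · rw [hroot, hjt, ← hj]
    · rw [hroot]; exact hpf
  · rintro ⟨m, hm2, h2m, hroot, hprf⟩
    have hm1 : 1 ≤ m := by omega
    obtain ⟨hr1, -, -⟩ := iroot_spec q m (by omega) hm1
    have hr2 : 2 ≤ iroot q m := by
      rcases eq_or_lt_of_le hr1 with heq | hlt
      · exfalso; rw [← heq, one_pow] at hroot; omega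
      · omega
    have hmt : 2 ≤ m.toNat := by omega
    have hrsq : iroot q m * iroot q m ≤ q := by
      have h1 : iroot q m * iroot q m = (iroot q m) ^ 2 := by ring
      have h2 : (iroot q m) ^ 2 ≤ (iroot q m) ^ m.toNat :=
        pow_le_pow_right₀ (by omega) hmt
      omega
    refine ⟨iroot q m, PySem.List.mem_pyRange_one.mpr ⟨hr2, ?_⟩, hprf, ?_, ?_⟩
    · have := (le_sqrt_int q (iroot q m) (by omega) (by omega)).mpr hrsq
      omega
    · rw [PySem.Int.mod_eq_zero_iff_dvd]
      have hdvd := dvd_pow_self (iroot q m) (show m.toNat ≠ 0 by omega)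
      rw [hroot] at hdvd
      exact hdvd
    · exact (divOutB_aux (iroot q m) hr2 q.toNat q 0 (by omega) le_rfl).mpr ⟨m.toNat, hroot.symm⟩

-- ===== VERDICT (by name: the statement is the Claim_ definition above) =====
theorem eligible_n_values_spec : Claim_equal_eligible_n_values := by
  intro max_n hDom
  unfold Spec_eligible_n_values eligible_n_values eligible_n_values_alt
  apply PySem.List.foldl_congr_mem
  intro acc n hn
  obtain ⟨hn2, hnlt⟩ := PySem.List.mem_pyRange_one.mp hn
  have hmax : max_n ≤ 2147483648 := by
    have := of_decide_eq_true hDom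
    omega
  dsimp only
  by_cases h4 : PySem.Int.mod (2 * n - 1) 4 ≠ 1
  · rw [if_pos h4, if_pos h4]
  · rw [if_neg h4, if_neg h4]
    unfold prime_power_decompose
    rw [if_neg (show ¬(2 * n - 1 < 2) by omega)]
    by_cases hpr : is_prime (2 * n - 1) = true
    · rw [if_pos hpr, if_pos hpr]
      simp
    · rw [if_neg hpr, if_neg hpr]
      have hiff := branch_iff (2 * n - 1) (by omega) (by omega)
      by_cases hB : powLoop (2 * n - 1) 64 2 = true
      · rw [if_pos (hiff.mpr hB), if_pos hB]
      · rw [if_neg (fun h => hB (hiff.mp h)), if_neg hB]
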